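-- pv_equiv track=rewrite | github.com/Roskgp96/Algorithm-Problems | src/unique_cap_to_every_person.py | unique_ways
-- ===== SOURCE A (Python) =====
-- import copy
--
-- def unique_ways(person_to_caps):
--     """Function to count number of unique ways to distribute caps so that each person wears a unique cap.
--
--     Args:
--         person_to_caps (Dict): The dictionary containing caps owned by each person.(Persons are numbered from 0 to n-1 and
--                                caps are numbered from 0 to N-1)
--
--
--     Returns:
--         no_of_ways (int): Number of unique ways to distribute caps so that each person wears a unique cap
--     """
--
--
--     min_person = min(person_to_caps.keys())
--     no_of_ways = 0
--
--     if len(person_to_caps.keys()) == 1: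
--         no_of_ways = len(person_to_caps[min_person])
--
--     else:
--         for item in person_to_caps[min_person]:
--             x = copy.deepcopy(person_to_caps)
--             del x[min_person]
--             for k,v in x.items():
--                 if item in v:
--                     v.remove(item)
--             no_of_ways += unique_ways(x)
--
--     return no_of_ways
-- ===== SOURCE B (Python) =====
-- def unique_ways(person_to_caps):
--     """Count assignments of one cap per person (persons in key order) where a cap
--     occurrence consumed by an earlier person is no longer available — forward
--     recursion with a list of already-used caps instead of deep-copying dicts."""
--     lists = [person_to_caps[k] for k in sorted(person_to_caps)]
--
--     def go(i, used):
--         if i == len(lists):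
--             return 1
--         total = 0
--         caps = lists[i]
--         for c in dict.fromkeys(caps):
--             avail = caps.count(c) - used.count(c)
--             if avail > 0:
--                 total += avail * go(i + 1, used + [c])
--         return total
--
--     return go(0, [])
-- ===== Notes on version B (the rewrite author's own statement) =====
-- stated objective: faster
-- what changed: Replaces A's recursion that deep-copies the whole dict and deletes/depletes it per branch by a forward recursion over the key-sorted cap lists that carries only the list of already-used caps and branches once per distinct cap value, weighting each branch by its remaining multiplicity.
import Mathlib
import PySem

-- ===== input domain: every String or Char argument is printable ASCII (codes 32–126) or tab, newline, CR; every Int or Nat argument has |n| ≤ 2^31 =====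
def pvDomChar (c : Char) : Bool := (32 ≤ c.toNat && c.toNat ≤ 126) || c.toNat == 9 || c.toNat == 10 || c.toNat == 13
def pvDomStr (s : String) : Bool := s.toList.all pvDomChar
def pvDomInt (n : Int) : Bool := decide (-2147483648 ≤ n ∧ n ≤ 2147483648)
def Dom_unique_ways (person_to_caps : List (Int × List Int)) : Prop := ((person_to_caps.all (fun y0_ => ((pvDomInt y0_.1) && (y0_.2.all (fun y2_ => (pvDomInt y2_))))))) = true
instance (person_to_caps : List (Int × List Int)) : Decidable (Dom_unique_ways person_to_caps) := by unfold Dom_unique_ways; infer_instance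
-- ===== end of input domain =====

-- B replaces A's deepcopy-and-delete dict recursion by a forward recursion over the
-- key-sorted cap lists that tracks only the already-used caps and branches once per
-- DISTINCT cap value (objective: faster — it removes the per-node dict deepcopy).

-- ===== PORT A =====
-- d[k] for a dict represented as an association list (first match; both Pythons only
-- evaluate it on keys that are present, so no KeyError case arises under Pre_).
def pvLookup (d : List (Int × List Int)) (k : Int) : List Int :=
  ((d.find? (fun p => p.1 == k)).map Prod.snd).getD []

-- 'if item in v: v.remove(item)' — List.erase removes the first occurrence, exactly list.remove.
def pvCondErase (item : Int) (v : List Int) : List Int :=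
  if item ∈ v then v.erase item else v

-- Fuel-indexed body of A; each recursive call is on a dict with exactly one key fewer,
-- so fuel = number of entries always suffices (fuel only makes the recursion total).
def pvUwAux : Nat → List (Int × List Int) → Int
  | 0, _ => 0
  | n + 1, d =>
    match PySem.List.min? (d.map Prod.fst) (fun k => k) with
    | none => 0  -- Python: min() raises ValueError on an empty dict; excluded by Pre_
    | some min_person =>
      if (d.map Prod.fst).length = 1 then
        PySem.List.len (pvLookup d min_person)
      else
        (pvLookup d min_person).foldl
          (fun no_of_ways item =>
            no_of_ways +
              pvUwAux n
                ((d.eraseP (fun p => p.1 == min_person)).map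
                  (fun p => (p.1, pvCondErase item p.2))))
          0

def unique_ways (person_to_caps : List (Int × List Int)) : Int :=
  pvUwAux person_to_caps.length person_to_caps

-- ===== PORT B =====
-- go(i, used) of Source B, as structural recursion on the suffix lists[i:].
def pvGo : List (List Int) → List Int → Int
  | [], _ => 1
  | caps :: rest, used =>
    let f := fun u => pvGo rest u
    (PySem.List.dedup caps).foldl
      (fun total c =>
        let avail : Int := (PySem.List.count caps c : Int) - (PySem.List.count used c : Int)
        if 0 < avail then total + avail * f (used ++ [c]) else total)
      0

def unique_ways_alt (person_to_caps : List (Int × List Int)) : Int :=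
  pvGo
    ((PySem.List.sorted (person_to_caps.map Prod.fst) (fun k => k)).map
      (fun k => pvLookup person_to_caps k))
    []

-- ===== PRECONDITION & SPEC =====
-- Pre_ excludes the empty dict, on which A raises ValueError (min() of an empty sequence),
-- and association lists with duplicate person keys, which do not represent a Python dict
-- (A's argument is a dict and can never contain them).
def Pre_unique_ways (person_to_caps : List (Int × List Int)) : Prop :=
  person_to_caps ≠ [] ∧ (person_to_caps.map Prod.fst).Nodup
instance (person_to_caps : List (Int × List Int)) : Decidable (Pre_unique_ways person_to_caps) := by
  unfold Pre_unique_ways; infer_instance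

def pvWitness_unique_ways : (List (Int × List Int)) := [(0, [1, 2]), (1, [2])]

def Spec_unique_ways (person_to_caps : List (Int × List Int)) (out : Int) : Prop :=
  out = unique_ways_alt person_to_caps
instance (person_to_caps : List (Int × List Int)) (out : Int) : Decidable (Spec_unique_ways person_to_caps out) := by
  unfold Spec_unique_ways; infer_instance

-- ===== CLAIM (what is proved, stated in full; the proofs are below) =====
def Claim_equal_unique_ways : Prop := ∀ (person_to_caps : List (Int × List Int)), Dom_unique_ways person_to_caps → Pre_unique_ways person_to_caps → Spec_unique_ways person_to_caps (unique_ways person_to_caps)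

-- ===== LEMMAS AND PROOFS =====

-- Removing (once each, first occurrence, when present) the caps already used.
def pvApplyUsed (u : List Int) (L : List Int) : List Int :=
  u.foldl (fun L c => pvCondErase c L) L

-- Mapping a transformation over every person's cap list.
def pvDMap (g : List Int → List Int) (d : List (Int × List Int)) : List (Int × List Int) :=
  d.map (fun p => (p.1, g p.2))

def pvListsOf (d : List (Int × List Int)) : List (List Int) :=
  (PySem.List.sorted (d.map Prod.fst) (fun k => k)).map (fun k => pvLookup d k)

lemma pvApplyUsed_nil (u : List Int) : pvApplyUsed u [] = [] := by
  induction u with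
  | nil => rfl
  | cons c u ih => simpa [pvApplyUsed, pvCondErase] using ih

lemma pvApplyUsed_append (u : List Int) (c : Int) (L : List Int) :
    pvApplyUsed (u ++ [c]) L = pvCondErase c (pvApplyUsed u L) := by
  simp [pvApplyUsed, List.foldl_append]

lemma pvLookup_dMap (g : List Int → List Int) (hg : g [] = []) (d : List (Int × List Int)) (k : Int) :
    pvLookup (pvDMap g d) k = g (pvLookup d k) := by
  induction d with
  | nil => simp [pvLookup, pvDMap, hg]
  | cons p d ih =>
    by_cases h : p.1 == k
    · simp [pvLookup, pvDMap, List.find?, h]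
    · simpa [pvLookup, pvDMap, List.find?, h] using ih

lemma pvLookup_eraseP (d : List (Int × List Int)) (mp k : Int) (hk : k ≠ mp) :
    pvLookup (d.eraseP (fun p => p.1 == mp)) k = pvLookup d k := by
  induction d with
  | nil => rfl
  | cons p d ih =>
    by_cases h : p.1 == mp
    · have : ¬ (p.1 == k) := by
        simp only [beq_iff_eq] at h ⊢; omega
      simp [List.eraseP_cons, h, pvLookup, List.find?, this]
    · by_cases h2 : p.1 == k
      · simp [List.eraseP_cons, h, pvLookup, List.find?, h2]
      · simpa [List.eraseP_cons, h, pvLookup, List.find?, h2] using ih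

lemma pvKeys_dMap (g : List Int → List Int) (d : List (Int × List Int)) :
    (pvDMap g d).map Prod.fst = d.map Prod.fst := by
  simp [pvDMap, List.map_map, Function.comp]

lemma pvKeys_eraseP (d : List (Int × List Int)) (mp : Int) :
    (d.eraseP (fun p => p.1 == mp)).map Prod.fst = (d.map Prod.fst).erase mp := by
  induction d with
  | nil => rfl
  | cons p d ih =>
    by_cases h : p.1 == mp
    · simp [List.eraseP_cons, h, List.erase_cons, h]
    · simp [List.eraseP_cons, h, List.erase_cons, h, ih]

lemma pvEraseP_dMap (g : List Int → List Int) (d : List (Int × List Int)) (mp : Int) :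
    (pvDMap g d).eraseP (fun p => p.1 == mp) = pvDMap g (d.eraseP (fun p => p.1 == mp)) := by
  induction d with
  | nil => rfl
  | cons p d ih =>
    by_cases h : p.1 == mp
    · simp [pvDMap, List.eraseP_cons, h]
    · simp only [pvDMap, List.map_cons, List.eraseP_cons, h] at ih ⊢
      simp [ih]

lemma pvDMap_dMap (g h : List Int → List Int) (d : List (Int × List Int)) :
    pvDMap g (pvDMap h d) = pvDMap (fun L => g (h L)) d := by
  simp [pvDMap, List.map_map, Function.comp]

-- count of the list with the used caps removed
lemma pvCount_applyUsed (u L : List Int) (c : Int) :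
    List.count c (pvApplyUsed u L) = List.count c L - List.count c u := by
  induction u generalizing L with
  | nil => simp [pvApplyUsed]
  | cons c0 u ih =>
    have step : pvApplyUsed (c0 :: u) L = pvApplyUsed u (pvCondErase c0 L) := rfl
    rw [step, ih, List.count_cons]
    rcases eq_or_ne c c0 with hc | hc
    · subst hc
      by_cases hmem : c ∈ L
      · have : List.count c (pvCondErase c L) = List.count c L - 1 := by
          simp [pvCondErase, hmem]
        rw [this]; simp; omega
      · have h0 : List.count c L = 0 := List.count_eq_zero.mpr hmem
        have : List.count c (pvCondErase c L) = List.count c L := by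
          simp [pvCondErase, hmem]
        rw [this, h0]; simp
    · have : List.count c (pvCondErase c0 L) = List.count c L := by
        by_cases hmem : c0 ∈ L
        · simp [pvCondErase, hmem, List.count_erase, hc.symm]
        · simp [pvCondErase, hmem]
      rw [this]; simp [hc.symm]

lemma pvMem_applyUsed (u L : List Int) (x : Int) (hx : x ∈ pvApplyUsed u L) : x ∈ L := by
  induction u generalizing L with
  | nil => simpa [pvApplyUsed] using hx
  | cons c0 u ih =>
    have hx' : x ∈ pvCondErase c0 L := ih _ hx
    by_cases hmem : c0 ∈ L
    · simp only [pvCondErase, if_pos hmem] at hx'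
      exact List.mem_of_mem_erase hx'
    · simpa [pvCondErase, hmem] using hx'

-- sum over a nodup list of an "indicator at x" function
lemma pvSum_ite_eq (l : List Int) (F : Int → Int) (x : Int) (hnd : l.Nodup) (hx : x ∈ l) :
    (l.map (fun c => if c = x then F c else 0)).sum = F x := by
  induction l with
  | nil => cases hx
  | cons a l ih =>
    rcases List.mem_cons.mp hx with h | h
    · subst h
      have hnotin : x ∉ l := (List.nodup_cons.mp hnd).1
      have hz : (l.map (fun c => if c = x then F c else 0)).sum = 0 := by
        apply List.sum_eq_zero
        intro y hy
        rcases List.mem_map.mp hy with ⟨c, hc, rfl⟩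
        have : c ≠ x := fun hcx => hnotin (hcx ▸ hc)
        simp [this]
      simp [hz]
    · have hne : a ≠ x := by
        rintro rfl; exact (List.nodup_cons.mp hnd).1 h
      simp only [List.map_cons, List.sum_cons, if_neg hne]
      rw [ih (List.nodup_cons.mp hnd).2 h]
      ring

-- the multiset identity: a sum over the elements of M equals the count-weighted sum
-- over the distinct values of L, when every element of M occurs in L
lemma pvSum_eq_dedup (M L : List Int) (F : Int → Int) (h : ∀ x ∈ M, x ∈ L) :
    (M.map F).sum =
      ((PySem.List.dedup L).map (fun c => (List.count c M : Int) * F c)).sum := by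
  induction M with
  | nil =>
    symm
    apply List.sum_eq_zero
    intro y hy
    rcases List.mem_map.mp hy with ⟨c, hc, rfl⟩
    simp
  | cons x M ih =>
    have hx : x ∈ PySem.List.dedup L := by
      rw [PySem.List.mem_dedup]
      exact h x (List.mem_cons_self ..)
    have hsub : ∀ y ∈ M, y ∈ L := fun y hy => h y (List.mem_cons_of_mem _ hy)
    have hterm : ∀ c : Int,
        (List.count c (x :: M) : Int) * F c
          = (List.count c M : Int) * F c + (if c = x then F c else 0) := by
      intro c
      rw [List.count_cons]
      by_cases hc : c = x
      · simp [hc]; ring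
      · simp [hc, Ne.symm hc]
    calc ((x :: M).map F).sum
        = F x + (M.map F).sum := by simp
      _ = F x + ((PySem.List.dedup L).map (fun c => (List.count c M : Int) * F c)).sum := by
          rw [ih hsub]
      _ = ((PySem.List.dedup L).map (fun c => (List.count c (x :: M) : Int) * F c)).sum := by
          have : ((PySem.List.dedup L).map (fun c => (List.count c (x :: M) : Int) * F c)).sum
              = ((PySem.List.dedup L).map (fun c =>
                  (List.count c M : Int) * F c + (if c = x then F c else 0))).sum := by
            congr 1
            exact List.map_congr_left (fun c _ => hterm c)
          rw [this]
          rw [show (fun c => (List.count c M : Int) * F c + (if c = x then F c else 0))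
                = (fun c => (fun c => (List.count c M : Int) * F c) c
                    + (fun c => if c = x then F c else 0) c) from rfl]
          rw [List.sum_map_add]
          rw [pvSum_ite_eq _ F x (PySem.List.nodup_dedup L) hx]
          ring

-- a guarded accumulating fold is the sum of the guarded terms
lemma pvFoldl_if_add (l : List Int) (P : Int → Prop) [DecidablePred P] (q : Int → Int) (a : Int) :
    l.foldl (fun t c => if P c then t + q c else t) a
      = a + (l.map (fun c => if P c then q c else 0)).sum := by
  induction l generalizing a with
  | nil => simp
  | cons c l ih =>
    by_cases h : P c <;> simp [h, ih, add_assoc]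

lemma pvFoldl_add (l : List Int) (F : Int → Int) (a : Int) :
    l.foldl (fun acc item => acc + F item) a = a + (l.map F).sum := by
  induction l generalizing a with
  | nil => simp
  | cons c l ih => simp [ih, add_assoc]

-- THE KEY LEMMA: summing F over the occurrence-depleted list equals B's guarded,
-- availability-weighted fold over the distinct caps of the original list.
lemma pvKey (L u : List Int) (F : Int → Int) :
    (pvApplyUsed u L).foldl (fun acc item => acc + F item) 0
      = (PySem.List.dedup L).foldl
          (fun total c =>
            if 0 < (PySem.List.count L c : Int) - (PySem.List.count u c : Int)
            then total + ((PySem.List.count L c : Int) - (PySem.List.count u c : Int)) * F c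
            else total)
          0 := by
  rw [pvFoldl_add, pvFoldl_if_add, zero_add, zero_add]
  rw [pvSum_eq_dedup (pvApplyUsed u L) L F (pvMem_applyUsed u L)]
  congr 1
  apply List.map_congr_left
  intro c _
  rw [pvCount_applyUsed, PySem.List.count_eq, PySem.List.count_eq]
  by_cases h : List.count c u < List.count c L
  · have h1 : ((List.count c L - List.count c u : Nat) : Int)
        = (List.count c L : Int) - (List.count c u : Int) := by omega
    have h2 : 0 < (List.count c L : Int) - (List.count c u : Int) := by omega
    rw [h1, if_pos h2]
  · have h1 : (List.count c L - List.count c u : Nat) = 0 := by omega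
    have h2 : ¬ (0 < (List.count c L : Int) - (List.count c u : Int)) := by omega
    rw [h1, if_neg h2]
    simp

-- sorted keys of a nodup nonempty list start with the minimum
lemma pvSorted_head (K : List Int) (mp : Int) (hnd : K.Nodup)
    (hm : PySem.List.min? K (fun k => k) = some mp) :
    PySem.List.sorted K (fun k => k)
      = mp :: PySem.List.sorted (K.erase mp) (fun k => k) := by
  have hmem : mp ∈ K := PySem.List.min?_mem hm
  have hmin : ∀ y ∈ K, mp ≤ y := PySem.List.min?_isMin hm
  have hperm : (mp :: PySem.List.sorted (K.erase mp) (fun k => k)).Perm K := by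
    refine List.Perm.trans (List.Perm.cons mp (PySem.List.sorted_perm ..)) ?_
    exact (List.perm_cons_erase hmem).symm
  apply PySem.List.sorted_eq_of_perm_of_pairwise_lt _ _ _ hperm
  have hnd' : (PySem.List.sorted (K.erase mp) (fun k => k)).Nodup :=
    (PySem.List.sorted_perm ..).nodup_iff.mpr (hnd.erase mp)
  have hle : (PySem.List.sorted (K.erase mp) (fun k => k)).Pairwise (fun a b => a ≤ b) :=
    PySem.List.sorted_pairwise ..
  constructor
  · intro y hy
    have hy' : y ∈ K.erase mp := (PySem.List.mem_sorted ..).mp hy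
    have hyK : y ∈ K := List.mem_of_mem_erase hy'
    have hne : y ≠ mp := (List.Nodup.mem_erase_iff hnd).mp hy' |>.1
    exact lt_of_le_of_ne (hmin y hyK) (Ne.symm hne)
  · exact (hle.and hnd').imp (fun h => lt_of_le_of_ne h.1 h.2)

-- B's one-step fold over distinct caps equals the sum over the depleted cap list
lemma pvStep (L : List Int) (rest : List (List Int)) (u : List Int) :
    (pvApplyUsed u L).foldl (fun acc item => acc + pvGo rest (u ++ [item])) 0
      = pvGo (L :: rest) u := by
  rw [pvKey L u (fun c => pvGo rest (u ++ [c]))]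
  simp only [pvGo]

lemma pvBase (L u : List Int) : pvGo [L] u = ((pvApplyUsed u L).length : Int) := by
  rw [← pvStep L [] u]
  have hbody : (fun (acc : Int) (item : Int) => acc + pvGo [] (u ++ [item]))
      = fun acc _ => acc + 1 := by
    funext acc item; simp [pvGo]
  rw [hbody, pvFoldl_add]
  simp

-- main invariant: A on the used-depleted dict = B's forward recursion with `used`
lemma pvMain : ∀ n (d : List (Int × List Int)), d.length = n →
    (d.map Prod.fst).Nodup → d ≠ [] → ∀ u : List Int,
    pvUwAux n (pvDMap (pvApplyUsed u) d) = pvGo (pvListsOf d) u := by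
  intro n
  induction n using Nat.strong_induction_on with
  | _ n ih =>
    intro d hlen hnd hne u
    cases d with
    | nil => exact absurd rfl hne
    | cons p d' =>
    subst hlen
    obtain ⟨mp, hm⟩ : ∃ mp, PySem.List.min? ((p :: d').map Prod.fst) (fun k => k) = some mp := by
      cases hmm : PySem.List.min? ((p :: d').map Prod.fst) (fun k => k) with
      | none => simp [PySem.List.min?_eq_none_iff] at hmm
      | some mp => exact ⟨mp, rfl⟩
    have hmem : mp ∈ (p :: d').map Prod.fst := PySem.List.min?_mem hm
    have hkeys : (pvDMap (pvApplyUsed u) (p :: d')).map Prod.fst = (p :: d').map Prod.fst :=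
      pvKeys_dMap ..
    have hlook : pvLookup (pvDMap (pvApplyUsed u) (p :: d')) mp
        = pvApplyUsed u (pvLookup (p :: d') mp) :=
      pvLookup_dMap _ (pvApplyUsed_nil u) _ _
    have hlen1 : (p :: d').length = d'.length + 1 := rfl
    rw [hlen1]
    simp only [pvUwAux, hkeys, hm, hlook]
    by_cases hd' : d' = []
    · subst hd'
      have hmp : mp = p.1 := by simpa using hmem
      subst hmp
      have hsingle : PySem.List.sorted [p.1] (fun k => k) = [p.1] :=
        PySem.List.sorted_eq_self_of_pairwise _ _ (List.pairwise_singleton _ _)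
      have hpl : pvLookup [p] p.1 = p.2 := by simp [pvLookup]
      simp [pvListsOf, hsingle, hpl, pvBase, PySem.List.len_eq]
    · have hcond : ¬ (((p :: d').map Prod.fst).length = 1) := by
        simp [hd']
      rw [if_neg hcond]
      -- names
      have hQlen : ((p :: d').eraseP (fun q => q.1 == mp)).length = d'.length := by
        obtain ⟨q, hq, hq1⟩ := List.mem_map.mp hmem
        rw [List.length_eraseP_of_mem hq (by simp [hq1])]
        rfl
      have hQnd : (((p :: d').eraseP (fun q => q.1 == mp)).map Prod.fst).Nodup := by
        rw [pvKeys_eraseP]; exact hnd.erase mp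
      have hQne : (p :: d').eraseP (fun q => q.1 == mp) ≠ [] := by
        intro h
        rw [h] at hQlen
        exact hd' (List.eq_nil_of_length_eq_zero hQlen.symm)
      -- the per-item recursive argument is the depleted erased dict
      have harg : ∀ item : Int,
          ((pvDMap (pvApplyUsed u) (p :: d')).eraseP (fun q => q.1 == mp)).map
              (fun q => (q.1, pvCondErase item q.2))
            = pvDMap (pvApplyUsed (u ++ [item])) ((p :: d').eraseP (fun q => q.1 == mp)) := by
        intro item
        rw [show (((pvDMap (pvApplyUsed u) (p :: d')).eraseP (fun q => q.1 == mp)).map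
              (fun q => (q.1, pvCondErase item q.2)))
            = pvDMap (pvCondErase item)
                ((pvDMap (pvApplyUsed u) (p :: d')).eraseP (fun q => q.1 == mp)) from rfl]
        rw [pvEraseP_dMap, pvDMap_dMap]
        apply List.map_congr_left
        intro q _
        simp [pvApplyUsed_append]
      -- B-side shape of the lists
      have hsorted : PySem.List.sorted ((p :: d').map Prod.fst) (fun k => k)
          = mp :: PySem.List.sorted (((p :: d').map Prod.fst).erase mp) (fun k => k) :=
        pvSorted_head _ _ hnd hm
      have hrest : pvListsOf ((p :: d').eraseP (fun q => q.1 == mp))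
          = (PySem.List.sorted (((p :: d').map Prod.fst).erase mp) (fun k => k)).map
              (fun k => pvLookup (p :: d') k) := by
        unfold pvListsOf
        rw [pvKeys_eraseP]
        apply List.map_congr_left
        intro k hk
        have hk' : k ∈ ((p :: d').map Prod.fst).erase mp := (PySem.List.mem_sorted ..).mp hk
        have hne' : k ≠ mp := ((List.Nodup.mem_erase_iff hnd).mp hk').1
        exact pvLookup_eraseP _ _ _ hne'
      have hlists : pvListsOf (p :: d')
          = pvLookup (p :: d') mp ::
            (PySem.List.sorted (((p :: d').map Prod.fst).erase mp) (fun k => k)).map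
              (fun k => pvLookup (p :: d') k) := by
        unfold pvListsOf
        rw [hsorted, List.map_cons]
      -- rewrite the recursive calls with the induction hypothesis
      have hbody : (fun (acc : Int) (item : Int) => acc +
            pvUwAux d'.length
              (((pvDMap (pvApplyUsed u) (p :: d')).eraseP (fun q => q.1 == mp)).map
                (fun q => (q.1, pvCondErase item q.2))))
          = fun acc item => acc +
              pvGo ((PySem.List.sorted (((p :: d').map Prod.fst).erase mp) (fun k => k)).map
                  (fun k => pvLookup (p :: d') k)) (u ++ [item]) := by
        funext acc item
        rw [harg item,
          ih d'.length (by omega) _ hQlen hQnd hQne (u ++ [item]), hrest]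
      rw [hbody, hlists, pvStep]
-- ===== VERDICT (by name: the statement is the Claim_ definition above) =====
theorem unique_ways_spec : Claim_equal_unique_ways := by
  intro d _ hpre
  unfold Spec_unique_ways
  have h := pvMain d.length d rfl hpre.2 hpre.1 []
  have hid : pvDMap (pvApplyUsed []) d = d := by
    simp [pvDMap, pvApplyUsed]
  rw [hid] at h
  exact h
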